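-- pv_equiv track=rewrite | github.com/sambitk017/Data_Science | BITS/MFDS/Assignments/Matrix_construction_REF_RREF.py | find_pivot_nonpivot_columns
-- ===== SOURCE A (Python) =====
-- def find_pivot_nonpivot_columns(matrix):
--     pivot_columns = []
--     nonpivot_columns = []
--     for j in range(len(matrix[0])):
--         column = [matrix[i][j] for i in range(len(matrix))]
--         if column.count(0) == len(column) - 1 and 1 in column:
--             pivot_columns.append(j)
--         else:
--             nonpivot_columns.append(j)
--     return pivot_columns, nonpivot_columns
-- ===== SOURCE B (Python) =====
-- def find_pivot_nonpivot_columns(matrix):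
--     ncols = len(matrix[0])
--     stats = [(0, False)] * ncols
--     for row in matrix:
--         stats = [(z + (v == 0), h or v == 1) for (z, h), v in zip(stats, row)]
--     pivot_columns = []
--     nonpivot_columns = []
--     for j in range(ncols):
--         z, h = stats[j]
--         if z == len(matrix) - 1 and h:
--             pivot_columns.append(j)
--         else:
--             nonpivot_columns.append(j)
--     return pivot_columns, nonpivot_columns
-- ===== Notes on version B (the rewrite author's own statement) =====
-- stated objective: alternative
-- what changed: B replaces A's per-column extraction-and-scan (building each column list, then counting zeros and testing membership of 1) with a single row-major pass that folds each row into a per-column (zero-count, has-one) statistics table via zip, followed by a classification pass over the table.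
import Mathlib
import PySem

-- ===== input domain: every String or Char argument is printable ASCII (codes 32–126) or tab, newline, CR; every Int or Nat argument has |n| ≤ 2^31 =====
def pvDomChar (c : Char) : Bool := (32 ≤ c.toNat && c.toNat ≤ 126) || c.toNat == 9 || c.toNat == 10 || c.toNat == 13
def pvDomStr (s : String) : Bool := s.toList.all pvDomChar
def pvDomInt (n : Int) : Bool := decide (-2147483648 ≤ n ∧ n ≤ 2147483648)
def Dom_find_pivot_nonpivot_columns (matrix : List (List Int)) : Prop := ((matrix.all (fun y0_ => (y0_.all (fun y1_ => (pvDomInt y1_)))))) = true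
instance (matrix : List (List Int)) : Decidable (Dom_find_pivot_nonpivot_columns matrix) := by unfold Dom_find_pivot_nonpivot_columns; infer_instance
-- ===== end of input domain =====

-- B replaces A's per-column extraction-and-scan with a single row-major pass maintaining a
-- per-column (zero-count, has-one) statistics table, then a classification pass over the table
-- (alternative decomposition, same asymptotic cost).

-- ===== PORT A =====
def find_pivot_nonpivot_columns (matrix : List (List Int)) : List Int × List Int :=
  (List.range (matrix.headD []).length).foldl
    (fun (acc : List Int × List Int) (j : Nat) =>
      -- column = [matrix[i][j] for i in range(len(matrix))]
      if ((matrix.map (fun row => (PySem.List.pyGet? row (j : Int)).getD 0)).count 0 : Int)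
           = ((matrix.map (fun row => (PySem.List.pyGet? row (j : Int)).getD 0)).length : Int) - 1
           ∧ (1 : Int) ∈ matrix.map (fun row => (PySem.List.pyGet? row (j : Int)).getD 0)
      then (acc.1 ++ [(j : Int)], acc.2)
      else (acc.1, acc.2 ++ [(j : Int)]))
    ([], [])

-- ===== PORT B =====
-- one row folded into the per-column statistics table (the zip comprehension of Source B)
def pvStep (stats : List (Int × Bool)) (row : List Int) : List (Int × Bool) :=
  List.zipWith (fun s v => (s.1 + (if v = 0 then (1 : Int) else 0), s.2 || (v == 1))) stats row

-- the statistics table after the row-major pass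
def pvStats (matrix : List (List Int)) : List (Int × Bool) :=
  matrix.foldl pvStep (List.replicate (matrix.headD []).length ((0 : Int), false))

def find_pivot_nonpivot_columns_alt (matrix : List (List Int)) : List Int × List Int :=
  (List.range (matrix.headD []).length).foldl
    (fun (acc : List Int × List Int) (j : Nat) =>
      if ((pvStats matrix).getD j ((0 : Int), false)).1 = (matrix.length : Int) - 1
           ∧ ((pvStats matrix).getD j ((0 : Int), false)).2 = true
      then (acc.1 ++ [(j : Int)], acc.2)
      else (acc.1, acc.2 ++ [(j : Int)]))
    ([], [])

-- ===== PRECONDITION & SPEC =====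
-- A raises IndexError on the empty matrix (matrix[0]) and whenever some row is shorter than
-- row 0 (matrix[i][j] out of range); exactly those inputs are excluded.
def Pre_find_pivot_nonpivot_columns (matrix : List (List Int)) : Prop :=
  matrix ≠ [] ∧ ∀ row ∈ matrix, (matrix.headD []).length ≤ row.length
instance (matrix : List (List Int)) : Decidable (Pre_find_pivot_nonpivot_columns matrix) := by
  unfold Pre_find_pivot_nonpivot_columns; infer_instance

def pvWitness_find_pivot_nonpivot_columns : List (List Int) := [[1, 0], [0, 2]]

def Spec_find_pivot_nonpivot_columns (matrix : List (List Int)) (out : List Int × List Int) : Prop := out = find_pivot_nonpivot_columns_alt matrix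
instance (matrix : List (List Int)) (out : List Int × List Int) : Decidable (Spec_find_pivot_nonpivot_columns matrix out) := by unfold Spec_find_pivot_nonpivot_columns; infer_instance

-- ===== CLAIM (what is proved, stated in full; the proofs are below) =====
def Claim_equal_find_pivot_nonpivot_columns : Prop := ∀ (matrix : List (List Int)), Dom_find_pivot_nonpivot_columns matrix → Pre_find_pivot_nonpivot_columns matrix → Spec_find_pivot_nonpivot_columns matrix (find_pivot_nonpivot_columns matrix)

-- ===== LEMMAS AND PROOFS =====

-- the j-th column as port A extracts it
def pvCol (m : List (List Int)) (j : Nat) : List Int :=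
  m.map (fun row => (PySem.List.pyGet? row (j : Int)).getD 0)

lemma pvStep_length (stats : List (Int × Bool)) (row : List Int)
    (h : stats.length ≤ row.length) : (pvStep stats row).length = stats.length := by
  simp [pvStep, h]

lemma pvStats_get (m : List (List Int)) (stats : List (Int × Bool)) (j : Nat)
    (hrow : ∀ row ∈ m, stats.length ≤ row.length) (hj : j < stats.length) :
    (m.foldl pvStep stats)[j]? =
      some (stats[j].1 + (((pvCol m j).count 0 : Int)), stats[j].2 || (pvCol m j).contains 1) := by
  induction m generalizing stats with
  | nil => simp [pvCol]
  | cons row rest ih =>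
    have hr : stats.length ≤ row.length := hrow row (by simp)
    have hlen : (pvStep stats row).length = stats.length := pvStep_length stats row hr
    have hrow' : ∀ r ∈ rest, (pvStep stats row).length ≤ r.length := by
      intro r hrmem; rw [hlen]; exact hrow r (by simp [hrmem])
    have hj' : j < (pvStep stats row).length := by omega
    have := ih (pvStep stats row) hrow' hj'
    rw [List.foldl_cons, this]
    have hjr : j < row.length := lt_of_lt_of_le hj hr
    have hget : (pvStep stats row)[j]'hj' =
        (stats[j].1 + (if row[j] = 0 then (1 : Int) else 0), stats[j].2 || (row[j] == 1)) := by
      simp [pvStep]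
    have hcol : pvCol (row :: rest) j = row[j] :: pvCol rest j := by
      simp [pvCol, PySem.List.pyGet?_natCast, List.getElem?_eq_getElem hjr]
    rw [hget, hcol]
    by_cases h0 : row[j] = 0 <;> by_cases h1 : row[j] = 1 <;>
      simp [List.count_cons, h0, h1, Bool.or_assoc, beq_eq_decide, @eq_comm Int 1] <;> ring

-- ===== VERDICT (by name: the statement is the Claim_ definition above) =====
theorem find_pivot_nonpivot_columns_spec : Claim_equal_find_pivot_nonpivot_columns := by
  intro matrix _ hpre
  unfold Spec_find_pivot_nonpivot_columns
  unfold find_pivot_nonpivot_columns find_pivot_nonpivot_columns_alt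
  have hrow : ∀ row ∈ matrix,
      (List.replicate (matrix.headD []).length ((0 : Int), false)).length ≤ row.length := by
    intro row hr; rw [List.length_replicate]; exact hpre.2 row hr
  apply (PySem.List.foldl_congr_mem _ _ _ _ ?_).symm
  intro acc j hj
  have hjn : j < (matrix.headD []).length := List.mem_range.mp hj
  have hjs : j < (List.replicate (matrix.headD []).length ((0 : Int), false)).length := by
    simpa using hjn
  have hget := pvStats_get matrix (List.replicate (matrix.headD []).length ((0 : Int), false)) j hrow hjs
  have hgetD : (pvStats matrix).getD j ((0 : Int), false)
      = (((pvCol matrix j).count 0 : Int), (pvCol matrix j).contains 1) := by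
    unfold pvStats
    rw [List.getD_eq_getElem?_getD, hget]
    simp
  rw [hgetD]
  have hcl : (pvCol matrix j).length = matrix.length := by simp [pvCol]
  have hiff : ((((matrix.map (fun row => (PySem.List.pyGet? row (j : Int)).getD 0)).count 0 : Int))
        = ((matrix.map (fun row => (PySem.List.pyGet? row (j : Int)).getD 0)).length : Int) - 1
        ∧ (1 : Int) ∈ matrix.map (fun row => (PySem.List.pyGet? row (j : Int)).getD 0)) ↔
      ((((pvCol matrix j).count 0 : Int)) = (matrix.length : Int) - 1
        ∧ (pvCol matrix j).contains 1 = true) := by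
    rw [show matrix.map (fun row => (PySem.List.pyGet? row (j : Int)).getD 0) = pvCol matrix j from rfl,
        hcl]
    simp
  rw [if_congr hiff rfl rfl]
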